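-- pv_equiv track=rewrite | github.com/GREENRAT-K405/SEM4_AI | LAB-7/Q1.py | run_hc
-- ===== SOURCE A (Python) =====
-- def calc(arr):
--     h = 0
--     for i in range(8):
--         for j in range(i + 1, 8):
--             if arr[i] == arr[j]:        #for same row
--                 h = h + 1
--             elif abs(arr[i] - arr[j]) == abs(i - j):      #for same diagonal
--                 h = h + 1
--     return h
--
-- def get_nxt(b): #input is state of the board configuration
--     min_h = calc(b)     # minimum heuristic
--     best = list(b)      # best board state
--
--     for i in range(8):  #each queen
--         for j in range(8):  #movement in row
--             if b[i] != j:
--                 temp = list(b)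
--                 temp[i] = j
--                 th = calc(temp)     #total heuristic
--                 if th < min_h:
--                     min_h = th
--                     best = list(temp)
--     return best, min_h
--
-- def run_hc(b):
--     cur = b
--     h1 = calc(cur)
--     count = 0
--
--     while 1:
--         next_board, next_heuristic = get_nxt(cur)
--         if next_heuristic >= h1:
--             break
--         cur = next_board
--         h1 = next_heuristic
--         count = count + 1
--
--     return cur, h1, count
-- ===== SOURCE B (Python) =====
-- def calc(arr):
--     # one pass: count collisions with three frequency tables (row, both diagonals)
--     rows = {}
--     d1 = {}
--     d2 = {}
--     h = 0
--     for i in range(8):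
--         v = arr[i]
--         h = h + (rows.get(v, 0) + d1.get(v + i, 0) + d2.get(v - i, 0))
--         rows[v] = rows.get(v, 0) + 1
--         d1[v + i] = d1.get(v + i, 0) + 1
--         d2[v - i] = d2.get(v - i, 0) + 1
--     return h
--
-- def neighbors(b):
--     # all single-queen moves, in row-major scan order
--     return [b[:i] + [j] + b[i + 1:] for i in range(8) for j in range(8) if b[i] != j]
--
-- def get_nxt(b):
--     # materialise every candidate (current board first), then pick the first
--     # board attaining the minimal heuristic
--     cands = [list(b)] + neighbors(b)
--     hs = [calc(c) for c in cands]
--     m = min(hs)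
--     return cands[hs.index(m)], m
--
-- def _climb(cur, h1, count):
--     nb, nh = get_nxt(cur)
--     if nh < h1:
--         return _climb(nb, nh, count + 1)
--     return cur, h1, count
--
-- def run_hc(b):
--     return _climb(b, calc(b), 0)
-- ===== Notes on version B (the rewrite author's own statement) =====
-- stated objective: alternative
-- what changed: The heuristic becomes a one-pass count with three frequency dictionaries (row, arr[i]+i, arr[i]-i) instead of a pairwise double loop; get_nxt materialises the full candidate list via a comprehension and picks the first board attaining min(heuristics) with min()/index() instead of folding a running best with a strict-< update; the while loop becomes a recursive descent.
import Mathlib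
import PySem

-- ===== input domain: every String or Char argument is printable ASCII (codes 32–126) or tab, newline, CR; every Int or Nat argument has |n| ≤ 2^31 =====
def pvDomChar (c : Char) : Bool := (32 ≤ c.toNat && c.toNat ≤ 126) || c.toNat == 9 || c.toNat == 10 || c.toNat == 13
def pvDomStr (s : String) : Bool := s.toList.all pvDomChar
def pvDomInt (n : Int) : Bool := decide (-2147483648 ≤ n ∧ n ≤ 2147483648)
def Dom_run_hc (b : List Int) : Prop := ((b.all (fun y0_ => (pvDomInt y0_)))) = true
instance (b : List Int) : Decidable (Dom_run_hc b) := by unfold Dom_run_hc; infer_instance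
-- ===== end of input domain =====

-- B restructures the whole search: the heuristic is a one-pass count with three frequency
-- tables instead of a pairwise double loop, get_nxt materialises the candidate list and picks
-- the first board attaining min(heuristics) instead of folding with a running best, and the
-- while-loop becomes a recursive descent.

-- ===== PORT A =====
-- calc: nested i<j scan over all pairs (IndexError for len < 8 is excluded by Pre_;
-- under Pre_ every pyGetD index is in range, so the default 0 is never used)
def pvCalcA (arr : List Int) : Int :=
  (PySem.List.pyRange 0 8 1).foldl (fun h i =>
    (PySem.List.pyRange (i + 1) 8 1).foldl (fun h j =>
      if PySem.List.pyGetD arr i 0 == PySem.List.pyGetD arr j 0 then h + 1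
      else if (PySem.List.pyGetD arr i 0 - PySem.List.pyGetD arr j 0).natAbs == (i - j).natAbs then h + 1
      else h) h) 0

-- get_nxt: state (min_h, best); temp[i] = j is List.set (exact: 0 ≤ i < 8 ≤ len under Pre_)
def pvGetNxtA (b : List Int) : List Int × Int :=
  let s := (PySem.List.pyRange 0 8 1).foldl (fun s i =>
    (PySem.List.pyRange 0 8 1).foldl (fun s j =>
      if PySem.List.pyGetD b i 0 != j then
        let temp := b.set i.toNat j
        let th := pvCalcA temp
        if th < s.1 then (th, temp) else s
      else s) s) (pvCalcA b, b)
  (s.2, s.1)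

-- while-loop: fuel (calc b).toNat + 1 is sufficient because the heuristic is a
-- nonnegative count that strictly decreases on every iteration
def pvLoopA : Nat → List Int → Int → Int → List Int × Int × Int
  | 0, cur, h1, count => (cur, h1, count)
  | fuel + 1, cur, h1, count =>
    let nb := pvGetNxtA cur
    if nb.2 ≥ h1 then (cur, h1, count)
    else pvLoopA fuel nb.1 nb.2 (count + 1)

def run_hc (b : List Int) : List Int × Int × Int :=
  pvLoopA ((pvCalcA b).toNat + 1) b (pvCalcA b) 0

-- ===== PORT B =====
-- calc: one pass over the 8 columns with three counter dicts (rows, arr[i]+i, arr[i]-i);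
-- state = (rows, d1, d2, h)
def pvCalcB (arr : List Int) : Int :=
  ((PySem.List.pyRange 0 8 1).foldl
    (fun (s : PySem.Dict Int Int × PySem.Dict Int Int × PySem.Dict Int Int × Int) i =>
      let v := PySem.List.pyGetD arr i 0
      let h := s.2.2.2 + (s.1.getD v 0 + s.2.1.getD (v + i) 0 + s.2.2.1.getD (v - i) 0)
      (s.1.insert v (s.1.getD v 0 + 1),
       s.2.1.insert (v + i) (s.2.1.getD (v + i) 0 + 1),
       s.2.2.1.insert (v - i) (s.2.2.1.getD (v - i) 0 + 1),
       h))
    (PySem.Dict.empty, PySem.Dict.empty, PySem.Dict.empty, 0)).2.2.2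

-- neighbors: the list comprehension [b[:i] + [j] + b[i+1:] for i … for j … if b[i] != j]
def pvNeighborsB (b : List Int) : List (List Int) :=
  (PySem.List.pyRange 0 8 1).flatMap (fun i =>
    (PySem.List.pyRange 0 8 1).filterMap (fun j =>
      if PySem.List.pyGetD b i 0 != j
      then some (PySem.List.slice b none (some i) ++ [j] ++ PySem.List.slice b (some (i + 1)) none)
      else none))

-- get_nxt: materialise cands = [list(b)] + neighbors(b), take m = min(hs) and the first
-- board attaining it; cands is nonempty and m ∈ hs, so Python's min/index/[] never raise
-- and the getD defaults are never used
def pvGetNxtB (b : List Int) : List Int × Int :=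
  let cands := b :: pvNeighborsB b
  let hs := cands.map pvCalcB
  let m := (PySem.List.min? hs (fun x => x)).getD 0
  let k := (PySem.List.index? hs m).getD 0
  (cands.getD k [], m)

-- _climb: recursion in Python; fuel (calc b).toNat + 1 suffices because the heuristic is a
-- nonnegative count that strictly decreases on every recursive call
def pvClimbB : Nat → List Int → Int → Int → List Int × Int × Int
  | 0, cur, h1, count => (cur, h1, count)
  | fuel + 1, cur, h1, count =>
    let p := pvGetNxtB cur
    if p.2 < h1 then pvClimbB fuel p.1 p.2 (count + 1) else (cur, h1, count)

def run_hc_alt (b : List Int) : List Int × Int × Int :=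
  pvClimbB ((pvCalcB b).toNat + 1) b (pvCalcB b) 0

-- ===== PRECONDITION & SPEC =====
-- Python A raises IndexError (arr[i] / temp[i] = j for i in range(8)) when the board has
-- fewer than 8 entries; exactly those inputs are excluded.
def Pre_run_hc (b : List Int) : Prop := 8 ≤ b.length
instance (b : List Int) : Decidable (Pre_run_hc b) := by unfold Pre_run_hc; infer_instance
def pvWitness_run_hc : List Int := [0, 1, 2, 3, 4, 5, 6, 7]

def Spec_run_hc (b : List Int) (out : List Int × Int × Int) : Prop := out = run_hc_alt b
instance (b : List Int) (out : List Int × Int × Int) : Decidable (Spec_run_hc b out) := by unfold Spec_run_hc; infer_instance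

-- ===== CLAIM (what is proved, stated in full; the proofs are below) =====
def Claim_equal_run_hc : Prop := ∀ (b : List Int), Dom_run_hc b → Pre_run_hc b → Spec_run_hc b (run_hc b)

-- ===== LEMMAS AND PROOFS =====

-- ---- part 1: the two heuristics agree ----

-- the 0/1 conflict indicator of a pair of columns (earlier column first)
def pvG (arr : List Int) (i j : Int) : Int :=
  if (PySem.List.pyGetD arr i 0 == PySem.List.pyGetD arr j 0)
     || ((PySem.List.pyGetD arr i 0 - PySem.List.pyGetD arr j 0).natAbs == (i - j).natAbs)
  then 1 else 0

-- the three bucket keys of column j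
def pvK0 (arr : List Int) (j : Int) : Int := PySem.List.pyGetD arr j 0
def pvK1 (arr : List Int) (j : Int) : Int := PySem.List.pyGetD arr j 0 + j
def pvK2 (arr : List Int) (j : Int) : Int := PySem.List.pyGetD arr j 0 - j

-- per-column contribution of B: earlier matches in each of the three buckets
def pvCnt (arr : List Int) (i : Int) : Int :=
  (((PySem.List.pyRange 0 i 1).map (pvK0 arr)).count (pvK0 arr i) : Int)
  + (((PySem.List.pyRange 0 i 1).map (pvK1 arr)).count (pvK1 arr i) : Int)
  + (((PySem.List.pyRange 0 i 1).map (pvK2 arr)).count (pvK2 arr i) : Int)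

lemma pv_foldl_ite2 {α : Type} (p q : α → Bool) (l : List α) (h : Int) :
    l.foldl (fun h j => if p j then h + 1 else if q j then h + 1 else h) h
      = h + (l.map (fun j => if p j || q j then (1 : Int) else 0)).sum := by
  induction l generalizing h with
  | nil => simp
  | cons a t ih =>
    by_cases hp : p a <;> by_cases hq : q a <;>
      simp [List.foldl_cons, hp, hq, ih] <;> ring

lemma pv_foldl_shift {α : Type} (F : Int → α → Int) (T : α → Int)
    (hF : ∀ h x, F h x = h + T x) (l : List α) (init : Int) :
    l.foldl F init = init + (l.map T).sum := by
  induction l generalizing init with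
  | nil => simp
  | cons a t ih => simp [List.foldl_cons, hF, ih, add_assoc]

lemma pvCalcA_eq_sum (arr : List Int) :
    pvCalcA arr
      = ((PySem.List.pyRange 0 8 1).map (fun i =>
          ((PySem.List.pyRange (i + 1) 8 1).map (fun j => pvG arr i j)).sum)).sum := by
  unfold pvCalcA
  rw [pv_foldl_shift _ (fun i => ((PySem.List.pyRange (i + 1) 8 1).map (fun j => pvG arr i j)).sum)]
  · simp
  · intro h i
    rw [pv_foldl_ite2 (fun j => PySem.List.pyGetD arr i 0 == PySem.List.pyGetD arr j 0)
        (fun j => (PySem.List.pyGetD arr i 0 - PySem.List.pyGetD arr j 0).natAbs == (i - j).natAbs)]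
    simp [pvG]

-- B's fold state after the first n columns: three counters over the key prefixes and the partial sum
lemma pv_insert_modify (d : PySem.Dict Int Int) (k : Int) :
    d.insert k (d.getD k 0 + 1) = d.modify k 0 (· + 1) := PySem.Dict.ext_iff.mpr rfl

lemma pvCalcB_state (arr : List Int) (n : Nat) :
    (PySem.List.pyRange 0 (n : Int) 1).foldl
      (fun (s : PySem.Dict Int Int × PySem.Dict Int Int × PySem.Dict Int Int × Int) i =>
        let v := PySem.List.pyGetD arr i 0
        let h := s.2.2.2 + (s.1.getD v 0 + s.2.1.getD (v + i) 0 + s.2.2.1.getD (v - i) 0)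
        (s.1.insert v (s.1.getD v 0 + 1),
         s.2.1.insert (v + i) (s.2.1.getD (v + i) 0 + 1),
         s.2.2.1.insert (v - i) (s.2.2.1.getD (v - i) 0 + 1),
         h))
      (PySem.Dict.empty, PySem.Dict.empty, PySem.Dict.empty, 0)
    = (PySem.Dict.counter ((PySem.List.pyRange 0 (n : Int) 1).map (pvK0 arr)),
       PySem.Dict.counter ((PySem.List.pyRange 0 (n : Int) 1).map (pvK1 arr)),
       PySem.Dict.counter ((PySem.List.pyRange 0 (n : Int) 1).map (pvK2 arr)),
       ((PySem.List.pyRange 0 (n : Int) 1).map (pvCnt arr)).sum) := by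
  induction n with
  | zero =>
    simp [PySem.List.pyRange_one_eq_nil (le_refl (0 : Int))]
    rfl
  | succ n ih =>
    rw [show ((n + 1 : Nat) : Int) = (n : Int) + 1 by push_cast; ring,
        PySem.List.pyRange_one_succ_right (by positivity)]
    rw [List.foldl_append, ih]
    simp only [List.foldl_cons, List.foldl_nil, List.map_append, List.map_cons, List.map_nil,
      List.sum_append, List.sum_cons, List.sum_nil]
    rw [PySem.Dict.counter_append_singleton, PySem.Dict.counter_append_singleton,
        PySem.Dict.counter_append_singleton,
        ← pv_insert_modify, ← pv_insert_modify, ← pv_insert_modify]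
    simp only [PySem.Dict.getD_counter, pvK0, pvK1, pvK2, pvCnt, add_zero]

lemma pvCalcB_eq_sum (arr : List Int) :
    pvCalcB arr = ((PySem.List.pyRange 0 8 1).map (pvCnt arr)).sum := by
  have h := pvCalcB_state arr 8
  unfold pvCalcB
  norm_num at h
  rw [h]

lemma pv_ind_split (x y a b : Int) (hab : a ≠ b) :
    ((if x == y then (1 : Int) else 0) + (if x + a == y + b then (1 : Int) else 0)
      + (if x - a == y - b then (1 : Int) else 0))
      = if (x == y) || ((x - y).natAbs == (a - b).natAbs) then (1 : Int) else 0 := by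
  simp only [beq_iff_eq, Bool.or_eq_true]
  split_ifs <;> omega

lemma pvCnt_list (arr : List Int) (i : Int) (l : List Int) (hl : ∀ j ∈ l, j ≠ i) :
    (((l.map (pvK0 arr)).count (pvK0 arr i) : Int)
      + ((l.map (pvK1 arr)).count (pvK1 arr i) : Int)
      + ((l.map (pvK2 arr)).count (pvK2 arr i) : Int))
      = (l.map (fun j => pvG arr j i)).sum := by
  induction l with
  | nil => simp
  | cons a t ih =>
    have ha : a ≠ i := hl a (by simp)
    have ht : ∀ j ∈ t, j ≠ i := fun j hj => hl j (by simp [hj])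
    simp only [List.map_cons, List.count_cons, List.sum_cons]
    rw [← ih ht]
    push_cast
    simp only [pvK0, pvK1, pvK2, pvG]
    rw [← pv_ind_split (PySem.List.pyGetD arr a 0) (PySem.List.pyGetD arr i 0) a i ha]
    split_ifs <;> ring

lemma pvCnt_eq_sum (arr : List Int) (i : Int) :
    pvCnt arr i = ((PySem.List.pyRange 0 i 1).map (fun j => pvG arr j i)).sum := by
  apply pvCnt_list
  intro j hj
  have := (PySem.List.mem_pyRange_one).mp hj
  omega

lemma pvCalc_eq (arr : List Int) : pvCalcA arr = pvCalcB arr := by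
  rw [pvCalcA_eq_sum, pvCalcB_eq_sum]
  simp only [funext fun i => pvCnt_eq_sum arr i]
  rw [show PySem.List.pyRange 0 8 1 = [0, 1, 2, 3, 4, 5, 6, 7] from by decide]
  norm_num
  rw [show PySem.List.pyRange 1 8 1 = [1, 2, 3, 4, 5, 6, 7] from by decide,
      show PySem.List.pyRange 2 8 1 = [2, 3, 4, 5, 6, 7] from by decide,
      show PySem.List.pyRange 3 8 1 = [3, 4, 5, 6, 7] from by decide,
      show PySem.List.pyRange 4 8 1 = [4, 5, 6, 7] from by decide,
      show PySem.List.pyRange 5 8 1 = [5, 6, 7] from by decide,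
      show PySem.List.pyRange 6 8 1 = [6, 7] from by decide,
      show PySem.List.pyRange 7 8 1 = [7] from by decide,
      show PySem.List.pyRange 0 1 1 = [0] from by decide,
      show PySem.List.pyRange 0 2 1 = [0, 1] from by decide,
      show PySem.List.pyRange 0 3 1 = [0, 1, 2] from by decide,
      show PySem.List.pyRange 0 4 1 = [0, 1, 2, 3] from by decide,
      show PySem.List.pyRange 0 5 1 = [0, 1, 2, 3, 4] from by decide,
      show PySem.List.pyRange 0 6 1 = [0, 1, 2, 3, 4, 5] from by decide,
      show PySem.List.pyRange 0 7 1 = [0, 1, 2, 3, 4, 5, 6] from by decide]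
  simp only [List.map_cons, List.map_nil, List.sum_cons, List.sum_nil]
  ring

-- ---- part 2: A's running-best fold picks the first board attaining min(heuristics) ----

lemma pv_foldl_filterMap {α β γ : Type} (g : α → Option β) (F : γ → β → γ) (l : List α) (s : γ) :
    (l.filterMap g).foldl F s = l.foldl (fun a x => (g x).elim a (F a)) s := by
  induction l generalizing s with
  | nil => rfl
  | cons x t ih => cases h : g x <;> simp [h, ih]

lemma pv_foldl_min_le (l : List Int) (x : Int) : l.foldl min x ≤ x := by
  induction l generalizing x with
  | nil => simp
  | cons a t ih => exact le_trans (ih (min x a)) (min_le_left x a)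

lemma pv_foldl_min_mem (l : List Int) (x : Int) : l.foldl min x = x ∨ l.foldl min x ∈ l := by
  induction l generalizing x with
  | nil => simp
  | cons a t ih =>
    rcases ih (min x a) with h | h
    · rcases le_total x a with hxa | hxa
      · left; rw [List.foldl_cons, h]; exact min_eq_left hxa
      · right; rw [List.foldl_cons, h, min_eq_right hxa]; exact List.mem_cons_self
    · right; rw [List.foldl_cons]; exact List.mem_cons_of_mem _ h

-- folding "keep the strictly better candidate" from (f c0, c0) yields the minimum heuristic
-- and the first candidate of c0 :: cs attaining it
lemma pv_first_min {α : Type} (f : α → Int) (d : α) (cs : List α) : ∀ (c0 : α),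
    cs.foldl (fun s c => if f c < s.1 then (f c, c) else s) (f c0, c0)
      = ((cs.map f).foldl min (f c0),
         (c0 :: cs).getD
           ((PySem.List.index? ((c0 :: cs).map f) ((cs.map f).foldl min (f c0))).getD 0) d) := by
  induction cs with
  | nil =>
    intro c0
    simp
  | cons c t ih =>
    intro c0
    have hmin : ∀ y z : Int, (if z < y then z else y) = min y z := by
      intro y z; rcases lt_or_ge z y with h | h <;> simp [min_def, h]
    simp only [List.foldl_cons, List.map_cons]
    by_cases hlt : f c < f c0
    · have hstate : (if f c < (f c0, c0).1 then (f c, c) else (f c0, c0)) = (f c, c) := by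
        simp [hlt]
      have hm : min (f c0) (f c) = f c := by rw [← hmin]; simp [hlt]
      rw [hstate, ih c, hm]
      have hM_le : (t.map f).foldl min (f c) ≤ f c := pv_foldl_min_le _ _
      have hne : f c0 ≠ (t.map f).foldl min (f c) := by omega
      have hmem : (t.map f).foldl min (f c) ∈ f c :: t.map f := by
        rcases pv_foldl_min_mem (t.map f) (f c) with h | h
        · simp [h]
        · simp [h]
      obtain ⟨k, hk⟩ := Option.isSome_iff_exists.mp
        ((PySem.List.index?_isSome_iff _ _).mpr hmem)
      simp only [List.map_cons]
      rw [PySem.List.index?_cons_of_ne _ hne, hk]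
      simp
    · have hstate : (if f c < (f c0, c0).1 then (f c, c) else (f c0, c0)) = (f c0, c0) := by
        simp [hlt]
      have hm : min (f c0) (f c) = f c0 := by rw [← hmin]; simp [hlt]
      rw [hstate, ih c0, hm]
      by_cases heq : f c0 = (t.map f).foldl min (f c0)
      · simp only [List.map_cons]
        rw [← heq, PySem.List.index?_cons_self, PySem.List.index?_cons_self]
        simp
      · have hM_le : (t.map f).foldl min (f c0) ≤ f c0 := pv_foldl_min_le _ _
        have hc0 : ¬ f c < f c0 := hlt
        have hnec : f c ≠ (t.map f).foldl min (f c0) := by omega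
        have hmem : (t.map f).foldl min (f c0) ∈ t.map f := by
          rcases pv_foldl_min_mem (t.map f) (f c0) with h | h
          · exact absurd h.symm heq
          · exact h
        obtain ⟨k, hk⟩ := Option.isSome_iff_exists.mp
          ((PySem.List.index?_isSome_iff _ _).mpr hmem)
        simp only [List.map_cons]
        rw [PySem.List.index?_cons_of_ne _ heq, PySem.List.index?_cons_of_ne _ heq,
            PySem.List.index?_cons_of_ne _ hnec, hk]
        simp

-- ---- part 3: the two get_nxt agree on boards of length ≥ 8 ----

-- A's nested scan, read as a fold of "keep the strictly better candidate" over B's candidate list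
lemma pvGetNxtA_flatten (b : List Int) (hb : 8 ≤ b.length) :
    (PySem.List.pyRange 0 8 1).foldl (fun s i =>
      (PySem.List.pyRange 0 8 1).foldl (fun s j =>
        if PySem.List.pyGetD b i 0 != j then
          let temp := b.set i.toNat j
          let th := pvCalcB temp
          if th < s.1 then (th, temp) else s
        else s) s) (pvCalcB b, b)
    = (pvNeighborsB b).foldl
        (fun s c => if pvCalcB c < s.1 then (pvCalcB c, c) else s) (pvCalcB b, b) := by
  unfold pvNeighborsB
  rw [List.foldl_flatMap]
  apply PySem.List.foldl_congr_mem
  intro s i hi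
  have hib := (PySem.List.mem_pyRange_one).mp hi
  rw [pv_foldl_filterMap]
  apply PySem.List.foldl_congr_mem
  intro s' j _
  by_cases hc : PySem.List.pyGetD b i 0 != j
  · have hslice : PySem.List.slice b none (some i) ++ [j] ++ PySem.List.slice b (some (i + 1)) none
        = b.set i.toNat j := by
      have h0 : (0 : Int) ≤ i := hib.1
      have h1 : (0 : Int) ≤ i + 1 := by omega
      rw [PySem.List.slice_to b h0, PySem.List.slice_from b h1,
          show (i + 1).toNat = i.toNat + 1 by omega,
          List.set_eq_take_cons_drop j (by omega)]
      simp
    simp only [hc, if_true, Option.elim, hslice]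
  · simp [hc]

lemma pvGetNxt_eq (b : List Int) (hb : 8 ≤ b.length) : pvGetNxtA b = pvGetNxtB b := by
  unfold pvGetNxtA pvGetNxtB
  simp only [pvCalc_eq]
  rw [pvGetNxtA_flatten b hb, pv_first_min pvCalcB [] (pvNeighborsB b) b]
  simp only [List.map_cons, PySem.List.min?_id_cons]
  rfl

-- get_nxt never changes the board length (each temp is b with one entry replaced)
lemma pvGetNxtA_len (b : List Int) : (pvGetNxtA b).1.length = b.length := by
  unfold pvGetNxtA
  have key : ∀ (l : List Int) (s : Int × List Int), s.2.length = b.length →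
      ((PySem.List.pyRange 0 8 1).foldl (fun s j =>
        if PySem.List.pyGetD b l.headI 0 != j then
          let temp := b.set l.headI.toNat j
          let th := pvCalcA temp
          if th < s.1 then (th, temp) else s
        else s) s).2.length = b.length := by
    intro l s hs
    -- inner loop over j, for an arbitrary fixed i (phrased via l.headI just to have a name)
    generalize PySem.List.pyRange 0 8 1 = r
    induction r generalizing s with
    | nil => exact hs
    | cons j t ih =>
      apply ih
      by_cases h1 : PySem.List.pyGetD b l.headI 0 != j
      · simp only [h1, if_true]
        by_cases h2 : pvCalcA (b.set l.headI.toNat j) < s.1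
        · simp [h2]
        · simp [h2, hs]
      · simp [h1, hs]
  have outer : ∀ (r : List Int) (s : Int × List Int), s.2.length = b.length →
      ((r.foldl (fun s i =>
        (PySem.List.pyRange 0 8 1).foldl (fun s j =>
          if PySem.List.pyGetD b i 0 != j then
            let temp := b.set i.toNat j
            let th := pvCalcA temp
            if th < s.1 then (th, temp) else s
          else s) s) s).2).length = b.length := by
    intro r
    induction r with
    | nil => intro s hs; exact hs
    | cons i t ih => intro s hs; exact ih _ (key [i] s hs)
  exact outer _ _ rfl

-- ---- part 4: loop vs recursion ----

lemma pvLoop_eq (fuel : Nat) : ∀ cur h1 count, 8 ≤ cur.length →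
    pvLoopA fuel cur h1 count = pvClimbB fuel cur h1 count := by
  induction fuel with
  | zero => intro cur h1 count _; rfl
  | succ n ih =>
    intro cur h1 count hcur
    simp only [pvLoopA, pvClimbB, ← pvGetNxt_eq cur hcur]
    by_cases h : (pvGetNxtA cur).2 ≥ h1
    · have h' : ¬ (pvGetNxtA cur).2 < h1 := by omega
      simp [h, h']
    · have h' : (pvGetNxtA cur).2 < h1 := by omega
      have hlen : 8 ≤ (pvGetNxtA cur).1.length := by rw [pvGetNxtA_len]; exact hcur
      simp [h, h', ih _ _ _ hlen]

-- ===== VERDICT (by name: the statement is the Claim_ definition above) =====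
theorem run_hc_spec : Claim_equal_run_hc := by
  intro b _ hb
  unfold Spec_run_hc run_hc run_hc_alt
  rw [pvCalc_eq, pvLoop_eq _ _ _ _ hb]
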